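-- pv_equiv track=rewrite | github.com/thomaspttn/LatLong | FBILatLong.py | get_partial_link_text
-- ===== SOURCE A (Python) =====
-- def get_partial_link_text(value):
--     partial_link_text = ""
--     # Turns the cell value into proper noun format
--     for i in range(len(value)):
--         if (i == 0) or (value[i-1] == " "):
--             partial_link_text = partial_link_text + value[i].upper()
--         else:
--             partial_link_text = partial_link_text + value[i].lower()
--     # Village and townships must be modified to get a proper search
--     if ("Township" in value) or ("Village" in value) or ("Town" in value):
--         j = 0
--         shortened_text = ""
--         while partial_link_text[j] != " ":
--             shortened_text = shortened_text + partial_link_text[j]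
--             j = j + 1
--         return shortened_text
--     else:
--         return partial_link_text
-- ===== SOURCE B (Python) =====
-- def get_partial_link_text(value):
--     # Word-wise: capitalize each space-separated chunk (preserves runs of spaces),
--     # then take the chunk before the first space when a keyword is present.
--     titled = " ".join(w.capitalize() for w in value.split(" "))
--     if ("Township" in value) or ("Village" in value) or ("Town" in value):
--         return titled.split(" ")[0]
--     return titled
-- ===== Notes on version B (the rewrite author's own statement) =====
-- stated objective: idiomatic
-- what changed: The index-based character loop (looking back at value[i-1]) is replaced by word-wise processing: split on spaces, capitalize each chunk and rejoin, and the hand-rolled while-scan truncation is replaced by taking the chunk before the first space via split; Pre_ excludes inputs where a keyword is present but no space exists, on which A raises IndexError. B does the casing in C-level split/capitalize/join instead of per-character Python-level string concatenation.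
import Mathlib
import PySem

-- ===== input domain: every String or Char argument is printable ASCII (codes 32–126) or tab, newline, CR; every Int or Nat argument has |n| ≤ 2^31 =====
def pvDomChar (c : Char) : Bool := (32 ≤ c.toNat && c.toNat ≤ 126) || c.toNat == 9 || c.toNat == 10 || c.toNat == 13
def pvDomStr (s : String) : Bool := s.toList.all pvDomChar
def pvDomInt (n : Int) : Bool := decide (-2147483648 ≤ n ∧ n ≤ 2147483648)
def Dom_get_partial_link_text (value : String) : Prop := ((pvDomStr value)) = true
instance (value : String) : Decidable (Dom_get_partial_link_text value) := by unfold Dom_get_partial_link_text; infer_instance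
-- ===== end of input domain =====

-- B replaces A's index-based character loop and hand-rolled while-scan with word-wise
-- split/capitalize/join processing (idiomatic; same exact return value on Pre_).


-- ===== PORT A =====
-- A's while loop 'while partial_link_text[j] != " ": …' accumulating characters up to the
-- first space; Python raises IndexError when the string runs out (excluded by Pre_), where
-- this recursion returns the accumulated text.
def pvShortenA : List Char → List Char
  | [] => []
  | c :: rest => if c == ' ' then [] else c :: pvShortenA rest

def get_partial_link_text (value : String) : String :=
  let cs := value.toList
  -- for i in range(len(value)): build partial_link_text char by char
  let plt := (PySem.List.pyRange 0 (cs.length : Int) 1).foldl (fun acc i =>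
    if i == 0 || PySem.List.pyGet? cs (i - 1) == some ' ' then
      acc ++ ((PySem.List.pyGet? cs i).map PySem.Chars.upperChar).toList
    else
      acc ++ ((PySem.List.pyGet? cs i).map PySem.Chars.lowerChar).toList) []
  if PySem.Str.isIn "Township" value || PySem.Str.isIn "Village" value || PySem.Str.isIn "Town" value then
    String.ofList (pvShortenA plt)
  else
    String.ofList plt

-- ===== PORT B =====
-- w.capitalize(): first char upper-cased, rest lower-cased (exact on the ASCII domain,
-- where Python's titlecase of the first char coincides with uppercase).
def pvCapitalize (w : List Char) : List Char :=
  match w with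
  | [] => []
  | c :: rest => PySem.Chars.upperChar c :: PySem.Chars.lower rest

def get_partial_link_text_alt (value : String) : String :=
  -- titled = " ".join(w.capitalize() for w in value.split(" "))
  let titled := PySem.Chars.join [' ']
    ((PySem.Chars.splitOn value.toList [' ']).map pvCapitalize)
  if PySem.Str.isIn "Township" value || PySem.Str.isIn "Village" value || PySem.Str.isIn "Town" value then
    -- titled.split(" ")[0] — split never returns an empty list, so index 0 always exists
    String.ofList ((PySem.List.pyGet? (PySem.Chars.splitOn titled [' ']) 0).getD [])
  else
    String.ofList titled

-- ===== PRECONDITION & SPEC =====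
-- Pre_ excludes exactly the inputs on which A raises IndexError: a keyword present but no
-- space anywhere in the string (the truncation scan runs off the end).
def Pre_get_partial_link_text (value : String) : Prop :=
  (PySem.Str.isIn "Township" value || PySem.Str.isIn "Village" value || PySem.Str.isIn "Town" value) = true →
  PySem.Str.isIn " " value = true
instance (value : String) : Decidable (Pre_get_partial_link_text value) := by
  unfold Pre_get_partial_link_text; infer_instance

def pvWitness_get_partial_link_text : String := "Green Township"

def Spec_get_partial_link_text (value : String) (out : String) : Prop := out = get_partial_link_text_alt value
instance (value : String) (out : String) : Decidable (Spec_get_partial_link_text value out) := by unfold Spec_get_partial_link_text; infer_instance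

-- ===== CLAIM (what is proved, stated in full; the proofs are below) =====
def Claim_equal_get_partial_link_text : Prop := ∀ (value : String), Dom_get_partial_link_text value → Pre_get_partial_link_text value → Spec_get_partial_link_text value (get_partial_link_text value)


-- ===== LEMMAS AND PROOFS =====

-- flag "capitalize the next character" after consuming a list of characters
def pvFlag (b : Bool) : List Char → Bool
  | [] => b
  | c :: cs => pvFlag (c == ' ') cs

-- the common title-casing both programs compute, as one structural recursion
def pvTitle (b : Bool) : List Char → List Char
  | [] => []
  | c :: cs => (if b then PySem.Chars.upperChar c else PySem.Chars.lowerChar c) :: pvTitle (c == ' ') cs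

-- structural form of splitting on a single space
def pvSplit : List Char → List (List Char)
  | [] => [[]]
  | c :: cs => if c == ' ' then [] :: pvSplit cs else (pvSplit cs).modifyHead (c :: ·)

theorem pvSplit_cons (cs : List Char) : ∃ w ws, pvSplit cs = w :: ws := by
  induction cs with
  | nil => exact ⟨[], [], rfl⟩
  | cons c rest ih =>
    obtain ⟨w, ws, h⟩ := ih
    by_cases hc : c == ' '
    · exact ⟨[], pvSplit rest, by simp [pvSplit, hc]⟩
    · exact ⟨c :: w, ws, by simp [pvSplit, hc, h]⟩

theorem pvFlag_append (b : Bool) (xs ys : List Char) :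
    pvFlag b (xs ++ ys) = pvFlag (pvFlag b xs) ys := by
  induction xs generalizing b with
  | nil => rfl
  | cons c cs ih => simp [pvFlag, ih]

theorem pvTitle_append (b : Bool) (xs ys : List Char) :
    pvTitle b (xs ++ ys) = pvTitle b xs ++ pvTitle (pvFlag b xs) ys := by
  induction xs generalizing b with
  | nil => rfl
  | cons c cs ih => simp [pvTitle, pvFlag, ih]

theorem pvShortenA_eq_takeWhile (l : List Char) :
    pvShortenA l = l.takeWhile (fun c => !(c == ' ')) := by
  induction l with
  | nil => rfl
  | cons c rest ih =>
    by_cases hc : c == ' ' <;> simp [pvShortenA, List.takeWhile, hc, ih]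

theorem pvSplit_headD (cs : List Char) :
    (pvSplit cs).headD [] = cs.takeWhile (fun c => !(c == ' ')) := by
  induction cs with
  | nil => rfl
  | cons c rest ih =>
    obtain ⟨w, ws, h⟩ := pvSplit_cons rest
    rw [h] at ih
    simp only [List.headD_cons] at ih
    by_cases hc : c == ' ' <;> simp [pvSplit, List.takeWhile, hc, h, ih]

-- A's index fold computes pvTitle
theorem pvFoldA (cs : List Char) (n : Nat) (hn : n ≤ cs.length) :
    (PySem.List.pyRange 0 (n : Int) 1).foldl (fun acc i =>
      if i == 0 || PySem.List.pyGet? cs (i - 1) == some ' ' then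
        acc ++ ((PySem.List.pyGet? cs i).map PySem.Chars.upperChar).toList
      else
        acc ++ ((PySem.List.pyGet? cs i).map PySem.Chars.lowerChar).toList) []
    = pvTitle true (cs.take n) := by
  induction n with
  | zero => simp [PySem.List.pyRange_one_eq_nil, pvTitle]
  | succ m ih =>
    have hm : m ≤ cs.length := Nat.le_of_succ_le hn
    have hcast : ((m + 1 : Nat) : Int) = (m : Int) + 1 := by push_cast; ring
    rw [hcast, PySem.List.pyRange_one_succ_right (by positivity), List.foldl_append, ih hm]
    have hlt : m < cs.length := hn
    have htake : cs.take (m + 1) = cs.take m ++ [cs[m]] := by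
      simpa [List.concat_eq_append] using (List.take_concat_get hlt).symm
    rw [htake, pvTitle_append]
    have hget : PySem.List.pyGet? cs (m : Int) = some cs[m] := by
      simp [PySem.List.pyGet?_natCast, List.getElem?_eq_getElem hlt]
    cases m with
    | zero =>
      have hget0 : PySem.List.pyGet? cs 0 = some cs[0] := by simpa using hget
      simp [hget0, pvTitle, pvFlag]
    | succ k =>
      have hk : k < cs.length := by omega
      have hgetk : PySem.List.pyGet? cs (((k + 1 : Nat) : Int) - 1) = some cs[k] := by
        have : ((k + 1 : Nat) : Int) - 1 = ((k : Nat) : Int) := by push_cast; ring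
        rw [this]
        simp [PySem.List.pyGet?_natCast, List.getElem?_eq_getElem hk]
      have htk : cs.take (k + 1) = cs.take k ++ [cs[k]] := by
        simpa [List.concat_eq_append] using (List.take_concat_get hk).symm
      have hflag : pvFlag true (cs.take (k + 1)) = (cs[k] == ' ') := by
        rw [htk, pvFlag_append]; rfl
      have hne : (((k + 1 : Nat) : Int) == 0) = false := by
        simp; omega
      have hsome : cs[k]? = some ' ' ↔ cs[k] = ' ' := by
        simp [List.getElem?_eq_getElem hk]
      have hget' : PySem.List.pyGet? cs ((k : Int) + 1) = some cs[k + 1] := by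
        simpa using hget
      have hne' : ¬((k : Int) + 1 = 0) := by omega
      by_cases hsp : cs[k] = ' '
      · simp [hgetk, hget', hflag, hsp, hne, hne', pvTitle, hsome]
      · simp [hgetk, hget', hflag, hsp, hne, hne', pvTitle, hsome]

-- PySem.Chars.splitOn on a single space is pvSplit
theorem pvGo_spec (l : List Char) : ∀ (fuel : Nat) (cur : List Char) (acc : List (List Char)),
    l.length ≤ fuel →
    PySem.Chars.splitOn.go [' '] fuel l cur acc
      = acc.reverse ++ (pvSplit l).modifyHead (cur.reverse ++ ·) := by
  induction l with
  | nil =>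
    intro fuel cur acc _
    cases fuel <;> simp [PySem.Chars.splitOn.go, pvSplit]
  | cons c rest ih =>
    intro fuel cur acc hlen
    cases fuel with
    | zero => simp at hlen
    | succ f =>
      have hf : rest.length ≤ f := by simpa using hlen
      by_cases hc : c == ' '
      · have hpre : [' '].isPrefixOf (c :: rest) = true := by
          simp [List.isPrefixOf]; exact (beq_iff_eq.mp hc).symm
        rw [PySem.Chars.splitOn.go, if_pos hpre]
        simp only [List.length_singleton, List.drop_one, List.tail_cons]
        rw [ih f [] (cur.reverse :: acc) hf]
        obtain ⟨w, ws, h⟩ := pvSplit_cons rest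
        simp [pvSplit, hc, h]
      · have hpre : [' '].isPrefixOf (c :: rest) = false := by
          simp [List.isPrefixOf]; intro h; exact absurd (beq_iff_eq.mpr h.symm) (by simpa using hc)
        rw [PySem.Chars.splitOn.go, if_neg (by simp [hpre])]
        rw [ih f (c :: cur) acc hf]
        obtain ⟨w, ws, h⟩ := pvSplit_cons rest
        simp [pvSplit, hc, h, List.append_assoc]

theorem pvSplitOn_eq (cs : List Char) : PySem.Chars.splitOn cs [' '] = pvSplit cs := by
  rw [PySem.Chars.splitOn, pvGo_spec cs (cs.length + 1) [] [] (by omega)]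
  obtain ⟨w, ws, h⟩ := pvSplit_cons cs
  simp [h]

theorem pvJoin_cons_head (sep : List Char) (x : Char) (l : List Char) (ls : List (List Char)) :
    PySem.Chars.join sep ((x :: l) :: ls) = x :: PySem.Chars.join sep (l :: ls) := by
  cases ls with
  | nil => simp [PySem.Chars.join_singleton]
  | cons b bs => simp [PySem.Chars.join_cons_cons]

-- B's join∘capitalize∘split computes pvTitle
theorem pvUpperChar_space : PySem.Chars.upperChar ' ' = ' ' := by decide
theorem pvLowerChar_space : PySem.Chars.lowerChar ' ' = ' ' := by decide

theorem pvJoinCap (cs : List Char) :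
    PySem.Chars.join [' '] ((pvSplit cs).map pvCapitalize) = pvTitle true cs ∧
    PySem.Chars.join [' '] (PySem.Chars.lower ((pvSplit cs).headD []) ::
      ((pvSplit cs).tail.map pvCapitalize)) = pvTitle false cs := by
  induction cs with
  | nil =>
    constructor <;> simp [pvSplit, pvCapitalize, pvTitle, PySem.Chars.join,
      PySem.Chars.lower, List.intercalate]
  | cons c rest ih =>
    obtain ⟨w, ws, h⟩ := pvSplit_cons rest
    obtain ⟨ih1, ih2⟩ := ih
    have ih1' := ih1
    rw [h] at ih2
    simp only [List.headD_cons, List.tail_cons] at ih2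
    by_cases hc : c == ' '
    · have hc' : c = ' ' := beq_iff_eq.mp hc
      subst hc'
      have hsplit : pvSplit (' ' :: rest) = [] :: w :: ws := by simp [pvSplit, h]
      constructor
      · rw [hsplit]
        simp only [List.map_cons]
        rw [show pvCapitalize [] = [] from rfl, PySem.Chars.join_cons_cons]
        rw [← List.map_cons, ← h, ih1']
        simp [pvTitle, pvUpperChar_space]
      · rw [hsplit]
        simp only [List.headD_cons, List.tail_cons, List.map_cons]
        rw [show PySem.Chars.lower [] = [] from rfl, PySem.Chars.join_cons_cons]
        rw [← List.map_cons, ← h, ih1']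
        simp [pvTitle, pvLowerChar_space]
    · have hsplit : pvSplit (c :: rest) = (c :: w) :: ws := by simp [pvSplit, hc, h]
      constructor
      · rw [hsplit]
        simp only [List.map_cons]
        rw [show pvCapitalize (c :: w) = PySem.Chars.upperChar c :: PySem.Chars.lower w from rfl]
        rw [pvJoin_cons_head, ih2]
        simp [pvTitle, hc]
      · rw [hsplit]
        simp only [List.headD_cons, List.tail_cons]
        rw [show PySem.Chars.lower (c :: w) = PySem.Chars.lowerChar c :: PySem.Chars.lower w from by
          simp [PySem.Chars.lower]]
        rw [pvJoin_cons_head, ih2]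
        simp [pvTitle, hc]
-- ===== VERDICT (by name: the statement is the Claim_ definition above) =====
theorem get_partial_link_text_spec : Claim_equal_get_partial_link_text := by
  intro value _ _
  unfold Spec_get_partial_link_text get_partial_link_text get_partial_link_text_alt
  have hfold := pvFoldA value.toList value.toList.length le_rfl
  rw [List.take_length] at hfold
  simp only [hfold, pvSplitOn_eq, (pvJoinCap value.toList).1]
  split_ifs with h
  · obtain ⟨w, ws, hw⟩ := pvSplit_cons (pvTitle true value.toList)
    rw [hw]
    have h0 : PySem.List.pyGet? (w :: ws) 0 = some w := by
      simp [PySem.List.pyGet?, PySem.List.pyIdx?]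
    rw [h0, Option.getD_some]
    have hw' : w = (pvTitle true value.toList).takeWhile (fun c => !(c == ' ')) := by
      have := pvSplit_headD (pvTitle true value.toList)
      rw [hw] at this
      simpa using this
    rw [pvShortenA_eq_takeWhile, hw']
  · rfl
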